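-- pv_equiv track=rewrite | github.com/mohrael/Sentence-Generator-Program | sent_generator.py | build_ngram_models
-- ===== SOURCE A (Python) =====
-- def build_ngram_models(tokens, n):
--     ngram_counts = {}
--     prefix_counts = {}
--     for i in range(len(tokens) - n + 1):
--         pair = tuple(tokens[i:i + n])    #extracting n-gram
--         prefix = pair[:-1]           #first n-1 words
--
--         if pair not in ngram_counts:
--             ngram_counts[pair] = 1
--         else:
--             ngram_counts[pair] += 1
--
--         if prefix not in prefix_counts:
--             prefix_counts[prefix] = 1
--         else:
--             prefix_counts[prefix] += 1
--
--     return prefix_counts, ngram_counts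
-- ===== SOURCE B (Python) =====
-- def build_ngram_models(tokens, n):
--     # One pass builds the n-gram counter; prefix totals come from a second
--     # pass over the distinct n-grams, adding each n-gram's count to its prefix.
--     ngram_counts = {}
--     for i in range(len(tokens) - n + 1):
--         pair = tuple(tokens[i:i + n])
--         ngram_counts[pair] = ngram_counts.get(pair, 0) + 1
--     prefix_counts = {}
--     for pair, c in ngram_counts.items():
--         prefix = pair[:-1]
--         prefix_counts[prefix] = prefix_counts.get(prefix, 0) + c
--     return prefix_counts, ngram_counts
-- ===== Notes on version B (the rewrite author's own statement) =====
-- stated objective: alternative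
-- what changed: A counts n-grams and prefixes together in one loop over token positions; B builds only the n-gram counter in the window loop and derives prefix counts in a second pass over the distinct n-grams of that counter, adding each n-gram's count to its prefix.
import Mathlib
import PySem

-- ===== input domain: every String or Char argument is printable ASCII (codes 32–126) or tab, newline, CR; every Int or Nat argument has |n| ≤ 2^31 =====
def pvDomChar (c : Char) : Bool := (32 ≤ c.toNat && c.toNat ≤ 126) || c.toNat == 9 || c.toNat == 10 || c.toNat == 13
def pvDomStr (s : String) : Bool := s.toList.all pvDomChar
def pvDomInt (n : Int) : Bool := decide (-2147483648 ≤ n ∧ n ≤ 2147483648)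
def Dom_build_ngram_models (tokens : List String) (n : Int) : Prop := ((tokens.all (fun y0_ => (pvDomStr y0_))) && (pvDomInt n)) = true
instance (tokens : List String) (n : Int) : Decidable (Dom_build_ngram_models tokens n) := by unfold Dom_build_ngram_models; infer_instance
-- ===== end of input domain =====

-- B restructures A: one loop builds only the n-gram counter, then a second pass over the
-- distinct n-grams adds each n-gram's count to its (n-1)-prefix; same return value (alternative decomposition).

-- ===== PORT A =====
def build_ngram_models (tokens : List String) (n : Int) : (List (List String × Int)) × (List (List String × Int)) :=
  let res := (PySem.List.pyRange 0 ((tokens.length : Int) - n + 1) 1).foldl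
    (fun (st : PySem.Dict (List String) Int × PySem.Dict (List String) Int) i =>
      (if st.1.contains (PySem.List.slice tokens (some i) (some (i + n))) then
         st.1.modify (PySem.List.slice tokens (some i) (some (i + n))) 0 (· + 1)
       else
         st.1.insert (PySem.List.slice tokens (some i) (some (i + n))) 1,
       if st.2.contains (PySem.List.slice (PySem.List.slice tokens (some i) (some (i + n))) none (some (-1))) then
         st.2.modify (PySem.List.slice (PySem.List.slice tokens (some i) (some (i + n))) none (some (-1))) 0 (· + 1)
       else
         st.2.insert (PySem.List.slice (PySem.List.slice tokens (some i) (some (i + n))) none (some (-1))) 1))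
    (PySem.Dict.empty, PySem.Dict.empty)
  (res.2.items, res.1.items)

-- ===== PORT B =====
def build_ngram_models_alt (tokens : List String) (n : Int) : (List (List String × Int)) × (List (List String × Int)) :=
  let ng := (PySem.List.pyRange 0 ((tokens.length : Int) - n + 1) 1).foldl
    (fun (d : PySem.Dict (List String) Int) i =>
      d.insert (PySem.List.slice tokens (some i) (some (i + n)))
        (d.getD (PySem.List.slice tokens (some i) (some (i + n))) 0 + 1))
    PySem.Dict.empty
  let pf := ng.items.foldl
    (fun (d : PySem.Dict (List String) Int) kc =>
      d.insert (PySem.List.slice kc.1 none (some (-1)))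
        (d.getD (PySem.List.slice kc.1 none (some (-1))) 0 + kc.2))
    PySem.Dict.empty
  (pf.items, ng.items)

-- ===== PRECONDITION & SPEC =====
def Spec_build_ngram_models (tokens : List String) (n : Int) (out : (List (List String × Int)) × (List (List String × Int))) : Prop := out = build_ngram_models_alt tokens n
instance (tokens : List String) (n : Int) (out : (List (List String × Int)) × (List (List String × Int))) : Decidable (Spec_build_ngram_models tokens n out) := by unfold Spec_build_ngram_models; infer_instance

-- ===== CLAIM (what is proved, stated in full; the proofs are below) =====
def Claim_equal_build_ngram_models : Prop := ∀ (tokens : List String) (n : Int), Dom_build_ngram_models tokens n → Spec_build_ngram_models tokens n (build_ngram_models tokens n)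

-- ===== LEMMAS AND PROOFS =====

-- d[k] = d.get(k, 0) + v  is  d.modify k 0 (· + v)  (definitional in PySem)
theorem pv_modify_eq_insert {κ : Type} [BEq κ] (d : PySem.Dict κ Int) (k : κ) (v : Int) :
    d.modify k 0 (· + v) = d.insert k (d.getD k 0 + v) := rfl

-- A's "if k not in d: d[k] = 1 else: d[k] += 1" is one unconditional counting step
theorem pv_if_count_step {κ : Type} [BEq κ] (d : PySem.Dict κ Int) (k : κ) :
    (if d.contains k then d.modify k 0 (· + 1) else d.insert k 1)
      = d.insert k (d.getD k 0 + 1) := by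
  by_cases h : d.contains k = true
  · simp [h, pv_modify_eq_insert]
  · simp only [Bool.not_eq_true] at h
    simp [h, PySem.Dict.getD_of_not_contains d 0 h]

-- two inserts at distinct keys commute when the second key is already present
theorem pv_insert_comm {κ ν : Type} [BEq κ] [LawfulBEq κ] (d : PySem.Dict κ ν)
    (k k' : κ) (v v' : ν) (hmem : d.contains k' = true) (hne : k ≠ k') :
    (d.insert k' v').insert k v = (d.insert k v).insert k' v' := by
  apply PySem.Dict.ext
  have hbne : (k == k') = false := by simpa using hne
  have hbne' : (k' == k) = false := by simpa using (Ne.symm hne)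
  by_cases hk : d.contains k = true
  · rw [PySem.Dict.items_insert_of_contains _ v
        (by rw [PySem.Dict.contains_insert]; simp [hk]),
      PySem.Dict.items_insert_of_contains _ v' hmem,
      PySem.Dict.items_insert_of_contains _ v' (by rw [PySem.Dict.contains_insert]; simp [hmem]),
      PySem.Dict.items_insert_of_contains _ v hk]
    simp only [List.map_map]
    apply List.map_congr_left
    intro p _
    simp only [Function.comp]
    by_cases h1 : (p.1 == k') = true
    · have h2 : (p.1 == k) = false := by
        have := eq_of_beq h1
        simp [this, hbne']
      simp [h1, h2, hbne']
    · by_cases h2 : (p.1 == k) = true <;> simp [h1, h2, hbne]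
  · simp only [Bool.not_eq_true] at hk
    rw [PySem.Dict.items_insert_of_not_contains _ v
        (by rw [PySem.Dict.contains_insert]; simp [hk, hbne]),
      PySem.Dict.items_insert_of_contains _ v' hmem,
      PySem.Dict.items_insert_of_contains _ v'
        (by rw [PySem.Dict.contains_insert]; simp [hmem]),
      PySem.Dict.items_insert_of_not_contains _ v hk]
    simp [hbne]

-- bumping an already-present key before a counting fold = bumping it after
theorem pv_fold_bump_comm {α β : Type} [BEq β] [LawfulBEq β] (f : α → β) (c : α → Int) :
    ∀ (l : List α) (d : PySem.Dict β Int) (x : β), d.contains x = true →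
    l.foldl (fun d k => d.insert (f k) (d.getD (f k) 0 + c k)) (d.insert x (d.getD x 0 + 1))
      = (l.foldl (fun d k => d.insert (f k) (d.getD (f k) 0 + c k)) d).insert x
          ((l.foldl (fun d k => d.insert (f k) (d.getD (f k) 0 + c k)) d).getD x 0 + 1) := by
  intro l
  induction l with
  | nil => intro d x hx; simp
  | cons k l ih =>
    intro d x hx
    simp only [List.foldl_cons]
    by_cases hfk : f k = x
    · subst hfk
      rw [PySem.Dict.insert_insert_self, PySem.Dict.getD_insert_self]
      have h1 : d.insert (f k) (d.getD (f k) 0 + 1 + c k)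
          = (d.insert (f k) (d.getD (f k) 0 + c k)).insert (f k)
              ((d.insert (f k) (d.getD (f k) 0 + c k)).getD (f k) 0 + 1) := by
        rw [PySem.Dict.insert_insert_self, PySem.Dict.getD_insert_self]
        ring_nf
      rw [h1, ih _ _ (PySem.Dict.contains_insert_self _ _ _)]
    · have hstep : (d.insert x (d.getD x 0 + 1)).insert (f k)
            ((d.insert x (d.getD x 0 + 1)).getD (f k) 0 + c k)
          = (d.insert (f k) (d.getD (f k) 0 + c k)).insert x
            ((d.insert (f k) (d.getD (f k) 0 + c k)).getD x 0 + 1) := by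
        rw [PySem.Dict.getD_insert_of_ne d _ _ hfk,
          PySem.Dict.getD_insert_of_ne d _ _ (Ne.symm hfk)]
        exact pv_insert_comm d (f k) x _ _ hx hfk
      rw [hstep]
      exact ih _ x (by rw [PySem.Dict.contains_insert]; simp [hx])

-- folding with one element's weight raised by 1 = fold then bump that element's key
theorem pv_fold_weight_bump {α β : Type} [DecidableEq α] [BEq β] [LawfulBEq β]
    (f : α → β) (c : α → Int) :
    ∀ (l : List α) (x : α) (d : PySem.Dict β Int), x ∈ l → l.Nodup →
    l.foldl (fun d k => d.insert (f k) (d.getD (f k) 0 + (c k + if k = x then 1 else 0))) d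
      = (l.foldl (fun d k => d.insert (f k) (d.getD (f k) 0 + c k)) d).insert (f x)
          ((l.foldl (fun d k => d.insert (f k) (d.getD (f k) 0 + c k)) d).getD (f x) 0 + 1) := by
  intro l
  induction l with
  | nil => intro x d hx _; simp at hx
  | cons k l ih =>
    intro x d hx hnd
    simp only [List.foldl_cons]
    rcases List.mem_cons.mp hx with hkx | hxl
    · subst hkx
      have hxl : x ∉ l := (List.nodup_cons.mp hnd).1
      have hcongr : l.foldl (fun d k' => d.insert (f k') (d.getD (f k') 0 + (c k' + if k' = x then 1 else 0)))
            (d.insert (f x) (d.getD (f x) 0 + (c x + 1)))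
          = l.foldl (fun d k' => d.insert (f k') (d.getD (f k') 0 + c k'))
            (d.insert (f x) (d.getD (f x) 0 + (c x + 1))) := by
        apply PySem.List.foldl_congr_mem
        intro acc y hy
        have : y ≠ x := fun h => hxl (h ▸ hy)
        simp [this]
      simp only [if_true]
      rw [hcongr]
      have h1 : d.insert (f x) (d.getD (f x) 0 + (c x + 1))
          = (d.insert (f x) (d.getD (f x) 0 + c x)).insert (f x)
              ((d.insert (f x) (d.getD (f x) 0 + c x)).getD (f x) 0 + 1) := by
        rw [PySem.Dict.insert_insert_self, PySem.Dict.getD_insert_self]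
        ring_nf
      rw [h1]
      exact pv_fold_bump_comm f c l _ (f x) (PySem.Dict.contains_insert_self _ _ _)
    · have hkx : k ≠ x := fun h => (List.nodup_cons.mp hnd).1 (h ▸ hxl)
      simp only [if_neg hkx, add_zero]
      exact ih x _ hxl (List.nodup_cons.mp hnd).2

-- the weighted fold over the distinct elements (with their counts) IS the counter of the image
theorem pv_fold_dedup_counts {α β : Type} [DecidableEq α] [BEq α] [LawfulBEq α] [BEq β] [LawfulBEq β]
    (f : α → β) (xs : List α) :
    (PySem.Set.ofList xs).foldl
        (fun d k => d.insert (f k) (d.getD (f k) 0 + (xs.count k : Int))) PySem.Dict.empty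
      = PySem.Dict.counter (xs.map f) := by
  induction xs using List.reverseRecOn with
  | nil => rfl
  | append_singleton xs x ih =>
    rw [PySem.Set.ofList_append_singleton, List.map_append, List.map_singleton,
      PySem.Dict.counter_append_singleton, pv_modify_eq_insert]
    have hc : ∀ k, ((xs ++ [x]).count k : Int) = (xs.count k : Int) + (if k = x then 1 else 0) := by
      intro k
      by_cases h : k = x
      · subst h; simp [List.count_append]
      · have hb : (x == k) = false := by simpa using (Ne.symm h)
        simp [List.count_append, List.count_singleton, h, hb]
    by_cases hx : x ∈ xs
    · rw [PySem.Set.add_of_mem (by rw [PySem.Set.mem_ofList]; exact hx)]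
      have hcongr : (PySem.Set.ofList xs).foldl
            (fun d k => d.insert (f k) (d.getD (f k) 0 + ((xs ++ [x]).count k : Int))) PySem.Dict.empty
          = (PySem.Set.ofList xs).foldl
            (fun d k => d.insert (f k) (d.getD (f k) 0 + ((xs.count k : Int) + if k = x then 1 else 0))) PySem.Dict.empty := by
        apply PySem.List.foldl_congr_mem
        intro acc y _
        rw [hc y]
      rw [hcongr, pv_fold_weight_bump f (fun k => (xs.count k : Int)) _ x _
            (by rw [PySem.Set.mem_ofList]; exact hx) (PySem.Set.nodup_ofList xs), ih]
    · rw [PySem.Set.add_of_not_mem (by rw [PySem.Set.mem_ofList]; exact hx)]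
      rw [List.foldl_append, List.foldl_cons, List.foldl_nil]
      have hcongr : (PySem.Set.ofList xs).foldl
            (fun d k => d.insert (f k) (d.getD (f k) 0 + ((xs ++ [x]).count k : Int))) PySem.Dict.empty
          = (PySem.Set.ofList xs).foldl
            (fun d k => d.insert (f k) (d.getD (f k) 0 + (xs.count k : Int))) PySem.Dict.empty := by
        apply PySem.List.foldl_congr_mem
        intro acc y hy
        have hyx : y ≠ x := fun h => hx (h ▸ ((PySem.Set.mem_ofList _ _).mp hy))
        rw [hc y, if_neg hyx, add_zero]
      rw [hcongr, ih, hc x, if_pos rfl]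
      have : (xs.count x : Int) = 0 := by simp [List.count_eq_zero_of_not_mem hx]
      rw [this]
      ring_nf

-- B's second pass over the n-gram counter's items equals the direct prefix counter
theorem pv_second_pass {α β : Type} [DecidableEq α] [BEq α] [LawfulBEq α] [BEq β] [LawfulBEq β]
    (f : α → β) (xs : List α) :
    (PySem.Dict.counter xs).items.foldl
        (fun (d : PySem.Dict β Int) kc => d.insert (f kc.1) (d.getD (f kc.1) 0 + kc.2)) PySem.Dict.empty
      = PySem.Dict.counter (xs.map f) := by
  rw [PySem.Dict.items_counter, List.foldl_map]
  exact pv_fold_dedup_counts f xs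

-- ===== VERDICT (by name: the statement is the Claim_ definition above) =====
theorem build_ngram_models_spec : Claim_equal_build_ngram_models := by
  intro tokens n _
  unfold Spec_build_ngram_models build_ngram_models build_ngram_models_alt
  rw [PySem.List.foldl_prod_mk
    (f := fun (d : PySem.Dict (List String) Int) i =>
      if d.contains (PySem.List.slice tokens (some i) (some (i + n))) then
        d.modify (PySem.List.slice tokens (some i) (some (i + n))) 0 (· + 1)
      else d.insert (PySem.List.slice tokens (some i) (some (i + n))) 1)
    (g := fun (d : PySem.Dict (List String) Int) i =>
      if d.contains (PySem.List.slice (PySem.List.slice tokens (some i) (some (i + n))) none (some (-1))) then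
        d.modify (PySem.List.slice (PySem.List.slice tokens (some i) (some (i + n))) none (some (-1))) 0 (· + 1)
      else d.insert (PySem.List.slice (PySem.List.slice tokens (some i) (some (i + n))) none (some (-1))) 1)]
  have hif : ∀ (L : List Int) (key : Int → List String),
      L.foldl (fun (d : PySem.Dict (List String) Int) i =>
        if d.contains (key i) then d.modify (key i) 0 (· + 1) else d.insert (key i) 1) PySem.Dict.empty
      = PySem.Dict.counter (L.map key) := by
    intro L key
    rw [PySem.List.foldl_congr_mem _ _
      (fun (d : PySem.Dict (List String) Int) i => d.insert (key i) (d.getD (key i) 0 + 1)) _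
      (fun acc x _ => pv_if_count_step acc (key x))]
    rw [← List.foldl_map (f := key) (g := fun (d : PySem.Dict (List String) Int) k => d.insert k (d.getD k 0 + 1))]
    exact PySem.Dict.foldl_insert_getD_add_one_eq_counter _
  have hng : (PySem.List.pyRange 0 ((tokens.length : Int) - n + 1) 1).foldl
      (fun (d : PySem.Dict (List String) Int) i =>
        d.insert (PySem.List.slice tokens (some i) (some (i + n)))
          (d.getD (PySem.List.slice tokens (some i) (some (i + n))) 0 + 1)) PySem.Dict.empty
      = PySem.Dict.counter ((PySem.List.pyRange 0 ((tokens.length : Int) - n + 1) 1).map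
          (fun i => PySem.List.slice tokens (some i) (some (i + n)))) := by
    rw [← List.foldl_map (f := fun i => PySem.List.slice tokens (some i) (some (i + n)))
      (g := fun (d : PySem.Dict (List String) Int) k => d.insert k (d.getD k 0 + 1))]
    exact PySem.Dict.foldl_insert_getD_add_one_eq_counter _
  simp only [hif, hng, pv_second_pass (fun p => PySem.List.slice p none (some (-1)))]
  simp only [List.map_map, Function.comp_def]
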